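-- pv_equiv track=rewrite | github.com/dryayeet/temporal-lemon | src/pipeline.py | _inject_block
-- ===== SOURCE A (Python) =====
-- def _last_leading_system_index(history: list[dict]) -> int:
--     """Index just after the contiguous block of system messages at the front of `history`."""
--     i = 0
--     while i < len(history) and history[i]["role"] == "system":
--         i += 1
--     return i
--
-- def _inject_block(history: list[dict], tag: str, content: str) -> list[dict]:
--     """Drop any existing block with `tag`; insert `content` after the leading system block."""
--     filtered = [
--         m for m in history
--         if not (m["role"] == "system" and tag in m["content"])
--     ]
--     pos = _last_leading_system_index(filtered)
--     filtered.insert(pos, {"role": "system", "content": content})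
--     return filtered
-- ===== SOURCE B (Python) =====
-- def _inject_block(history: list[dict], tag: str, content: str) -> list[dict]:
--     """Single pass with a leading-run flag: drop tagged system blocks, split kept
--     messages into the leading system run and the rest, put the new block between."""
--     head, tail = [], []
--     in_leading = True
--     for m in history:
--         if m["role"] == "system":
--             if tag in m["content"]:
--                 continue
--             if in_leading:
--                 head.append(m)
--             else:
--                 tail.append(m)
--         else:
--             in_leading = False
--             tail.append(m)
--     return head + [{"role": "system", "content": content}] + tail
-- ===== Notes on version B (the rewrite author's own statement) =====
-- stated objective: alternative
-- what changed: B makes one pass over history with an in_leading flag, routing kept messages into head/tail and concatenating head + [new block] + tail, instead of A's filter pass followed by a second index-scan and a list.insert.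
import Mathlib
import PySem

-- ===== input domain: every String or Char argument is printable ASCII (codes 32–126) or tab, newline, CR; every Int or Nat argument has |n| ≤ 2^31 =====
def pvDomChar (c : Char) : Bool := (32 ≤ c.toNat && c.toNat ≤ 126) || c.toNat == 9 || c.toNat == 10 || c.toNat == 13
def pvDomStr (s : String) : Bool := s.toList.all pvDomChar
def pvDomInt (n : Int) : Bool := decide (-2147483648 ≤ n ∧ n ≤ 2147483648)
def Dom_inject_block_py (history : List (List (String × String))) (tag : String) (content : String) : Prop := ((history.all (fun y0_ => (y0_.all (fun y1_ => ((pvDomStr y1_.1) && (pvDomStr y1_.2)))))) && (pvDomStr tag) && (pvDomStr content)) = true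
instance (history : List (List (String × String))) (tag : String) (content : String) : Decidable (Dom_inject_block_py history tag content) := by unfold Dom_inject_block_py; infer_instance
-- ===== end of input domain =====

-- B replaces A's filter + second index-scan + list.insert by one pass with an
-- in_leading flag accumulating head/tail; return value only, A mutates no argument
-- (it inserts into its own fresh list).

-- ===== PORT A =====
-- while i < len(history) and history[i]["role"] == "system": i += 1  (walks the list front)
def pvLastLeadingAux : List (List (String × String)) → Nat → Nat
  | [], i => i
  | m :: rest, i =>
    if PySem.Dict.getD (PySem.Dict.mk m) "role" "" == "system" then pvLastLeadingAux rest (i + 1)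
    else i

def inject_block_py (history : List (List (String × String))) (tag : String) (content : String) : List (List (String × String)) :=
  let filtered := history.filter (fun m =>
    !((PySem.Dict.getD (PySem.Dict.mk m) "role" "" == "system") &&
      PySem.Str.isIn tag (PySem.Dict.getD (PySem.Dict.mk m) "content" "")))
  let pos := pvLastLeadingAux filtered 0
  PySem.List.insert filtered (pos : Int) [("role", "system"), ("content", content)]

-- ===== PORT B =====
-- the for-loop of Source B: state (in_leading, head, tail), same branch order
def pvInjGo (tag content : String) : List (List (String × String)) → Bool → List (List (String × String)) → List (List (String × String)) → List (List (String × String))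
  | [], _, head, tail => head ++ [("role", "system"), ("content", content)] :: tail
  | m :: rest, inLead, head, tail =>
    if PySem.Dict.getD (PySem.Dict.mk m) "role" "" == "system" then
      if PySem.Str.isIn tag (PySem.Dict.getD (PySem.Dict.mk m) "content" "") then
        pvInjGo tag content rest inLead head tail
      else if inLead then pvInjGo tag content rest inLead (head ++ [m]) tail
      else pvInjGo tag content rest inLead head (tail ++ [m])
    else pvInjGo tag content rest false head (tail ++ [m])

def inject_block_py_alt (history : List (List (String × String))) (tag : String) (content : String) : List (List (String × String)) :=
  pvInjGo tag content history true [] []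

-- ===== PRECONDITION & SPEC =====
-- Pre_ excludes only inputs on which the Python A raises KeyError (a message without a
-- "role" key, or a system message without a "content" key), and messages whose
-- association list has duplicate keys, which no Python dict input can produce.
def Pre_inject_block_py (history : List (List (String × String))) (tag : String) (content : String) : Prop :=
  ∀ m ∈ history, (m.map Prod.fst).Nodup ∧
    (PySem.Dict.mk m).contains "role" = true ∧
    (PySem.Dict.getD (PySem.Dict.mk m) "role" "" = "system" → (PySem.Dict.mk m).contains "content" = true)
instance (history : List (List (String × String))) (tag : String) (content : String) : Decidable (Pre_inject_block_py history tag content) := by unfold Pre_inject_block_py; infer_instance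

def pvWitness_inject_block_py : (List (List (String × String))) × String × String :=
  ([[("role", "system"), ("content", "rules")], [("role", "user"), ("content", "hi")]], "tg", "new block")

def Spec_inject_block_py (history : List (List (String × String))) (tag : String) (content : String) (out : List (List (String × String))) : Prop := out = inject_block_py_alt history tag content
instance (history : List (List (String × String))) (tag : String) (content : String) (out : List (List (String × String))) : Decidable (Spec_inject_block_py history tag content out) := by unfold Spec_inject_block_py; infer_instance

-- ===== CLAIM (what is proved, stated in full; the proofs are below) =====
def Claim_equal_inject_block_py : Prop := ∀ (history : List (List (String × String))) (tag : String) (content : String), Dom_inject_block_py history tag content → Pre_inject_block_py history tag content → Spec_inject_block_py history tag content (inject_block_py history tag content)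

-- ===== LEMMAS AND PROOFS =====
def pvSys (m : List (String × String)) : Bool :=
  PySem.Dict.getD (PySem.Dict.mk m) "role" "" == "system"

def pvKeep (tag : String) (m : List (String × String)) : Bool :=
  !(pvSys m && PySem.Str.isIn tag (PySem.Dict.getD (PySem.Dict.mk m) "content" ""))

-- common recursive specification: insert the new block after the leading system run of the kept messages
def pvSpecGo (tag content : String) : List (List (String × String)) → List (List (String × String))
  | [] => [[("role", "system"), ("content", content)]]
  | m :: rest =>
    if pvKeep tag m = false then pvSpecGo tag content rest
    else if pvSys m then m :: pvSpecGo tag content rest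
    else [("role", "system"), ("content", content)] :: (m :: rest).filter (pvKeep tag)

theorem pvLastLeadingAux_le (l : List (List (String × String))) : ∀ i, pvLastLeadingAux l i ≤ i + l.length := by
  induction l with
  | nil => intro i; simp [pvLastLeadingAux]
  | cons m rest ih =>
    intro i
    simp only [pvLastLeadingAux, List.length_cons]
    split
    · have := ih (i + 1); omega
    · omega

theorem pvLastLeadingAux_succ (l : List (List (String × String))) : ∀ i, pvLastLeadingAux l (i + 1) = pvLastLeadingAux l i + 1 := by
  induction l with
  | nil => intro i; simp [pvLastLeadingAux]
  | cons m rest ih =>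
    intro i
    simp only [pvLastLeadingAux]
    split
    · exact ih (i + 1)
    · rfl

theorem pvInsert_cons_succ (x : List (String × String)) (xs : List (List (String × String))) (n : Nat) (v : List (String × String)) (h : n ≤ xs.length) :
    PySem.List.insert (x :: xs) ((n + 1 : Nat) : Int) v = x :: PySem.List.insert xs (n : Int) v := by
  rw [PySem.List.insert_natCast (x :: xs) (n + 1) v (by simpa using Nat.succ_le_succ h),
      PySem.List.insert_natCast xs n v h]
  simp

-- A's computation equals the recursive specification
theorem pvA_eq_spec (tag content : String) (l : List (List (String × String))) :
    PySem.List.insert (l.filter (pvKeep tag)) ((pvLastLeadingAux (l.filter (pvKeep tag)) 0 : Nat) : Int) [("role", "system"), ("content", content)] = pvSpecGo tag content l := by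
  induction l with
  | nil => simp [pvSpecGo, pvLastLeadingAux, PySem.List.insert_zero]
  | cons m rest ih =>
    by_cases hk : pvKeep tag m = false
    · simp [pvSpecGo, hk, ih]
    · have hk' : pvKeep tag m = true := by simpa using hk
      by_cases hs : pvSys m = true
      · have hs' : (PySem.Dict.getD (PySem.Dict.mk m) "role" "" == "system") = true := hs
        simp only [pvSpecGo, hk', hs, if_true, List.filter_cons, Bool.true_eq_false, if_false]
        rw [show pvLastLeadingAux (m :: rest.filter (pvKeep tag)) 0 = pvLastLeadingAux (rest.filter (pvKeep tag)) 0 + 1 by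
              simp only [pvLastLeadingAux, hs', if_true]
              exact pvLastLeadingAux_succ _ 0]
        rw [pvInsert_cons_succ _ _ _ _ (by simpa using pvLastLeadingAux_le (rest.filter (pvKeep tag)) 0)]
        rw [ih]
      · have hs' : (PySem.Dict.getD (PySem.Dict.mk m) "role" "" == "system") = false := by
          simpa [pvSys] using hs
        simp [pvSpecGo, pvLastLeadingAux, hk', hs', pvSys, PySem.List.insert_zero]

-- B's loop after the flag has flipped: everything kept is appended to tail
theorem pvB_false (tag content : String) (l : List (List (String × String))) :
    ∀ head tail, pvInjGo tag content l false head tail = head ++ [("role", "system"), ("content", content)] :: (tail ++ l.filter (pvKeep tag)) := by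
  induction l with
  | nil => intro head tail; simp [pvInjGo]
  | cons m rest ih =>
    intro head tail
    by_cases hs : (PySem.Dict.getD (PySem.Dict.mk m) "role" "" == "system") = true
    · by_cases ht : PySem.Str.isIn tag (PySem.Dict.getD (PySem.Dict.mk m) "content" "") = true
      · have hk : pvKeep tag m = false := by simp [pvKeep, pvSys, hs]; simpa [PySem.Str.isIn] using ht
        simp only [pvInjGo, hs, ht, if_true]
        simp [ih, hk]
      · have ht' : PySem.Str.isIn tag (PySem.Dict.getD (PySem.Dict.mk m) "content" "") = false := by
          simpa using ht
        have hk : pvKeep tag m = true := by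
          simp [pvKeep, pvSys]; right; simpa [PySem.Str.isIn] using ht'
        simp only [pvInjGo, hs, ht', if_true, Bool.false_eq_true, if_false]
        simp [ih, hk]
    · have hk : pvKeep tag m = true := by simp [pvKeep, pvSys, hs]
      have hs' : (PySem.Dict.getD (PySem.Dict.mk m) "role" "" == "system") = false := by simpa using hs
      simp only [pvInjGo, hs', Bool.false_eq_true, if_false]
      simp [ih, hk]

-- B's loop while still in the leading run computes the recursive specification
theorem pvB_true (tag content : String) (l : List (List (String × String))) :
    ∀ head, pvInjGo tag content l true head [] = head ++ pvSpecGo tag content l := by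
  induction l with
  | nil => intro head; simp [pvInjGo, pvSpecGo]
  | cons m rest ih =>
    intro head
    by_cases hs : (PySem.Dict.getD (PySem.Dict.mk m) "role" "" == "system") = true
    · by_cases ht : PySem.Str.isIn tag (PySem.Dict.getD (PySem.Dict.mk m) "content" "") = true
      · have hk : pvKeep tag m = false := by simp [pvKeep, pvSys, hs]; simpa [PySem.Str.isIn] using ht
        simp only [pvInjGo, hs, ht, if_true]
        simp [ih, pvSpecGo, hk]
      · have ht' : PySem.Str.isIn tag (PySem.Dict.getD (PySem.Dict.mk m) "content" "") = false := by
          simpa using ht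
        have hk : pvKeep tag m = true := by
          simp [pvKeep, pvSys]; right; simpa [PySem.Str.isIn] using ht'
        have hsys : pvSys m = true := hs
        simp only [pvInjGo, hs, ht', if_true, Bool.false_eq_true, if_false]
        simp [ih, pvSpecGo, hk, hsys]
    · have hk : pvKeep tag m = true := by simp [pvKeep, pvSys, hs]
      have hsys : pvSys m = false := by simpa [pvSys] using hs
      simp only [pvInjGo, hs, Bool.false_eq_true, if_false]
      rw [pvB_false tag content rest]
      simp [pvSpecGo, hk, hsys]

-- ===== VERDICT (by name: the statement is the Claim_ definition above) =====
theorem inject_block_py_spec : Claim_equal_inject_block_py := by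
  intro history tag content _ _
  show inject_block_py history tag content = inject_block_py_alt history tag content
  unfold inject_block_py inject_block_py_alt
  rw [pvB_true tag content history [], List.nil_append]
  exact pvA_eq_spec tag content history
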